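-- pv_equiv track=rewrite | github.com/ysbiyiklioglu/Deepfake-detection | deepfake detection/app.py | detect_arch
-- ===== SOURCE A (Python) =====
-- def detect_arch(state_dict: dict) -> str:
--     keys = list(state_dict.keys())
--
--     # torchvision EfficientNet-B0 tipik imza: features.*.block.* veya features.0.0.weight
--     if any(k.startswith("features.") and ".block." in k for k in keys) or ("features.0.0.weight" in keys):
--         return "efficientnet_b0"
--
--     # ResNet
--     if "conv1.weight" in keys or any(k.startswith("layer1.") for k in keys):
--         return "resnet18"
--
--     # Simple CNN
--     if any(k.startswith("features.") for k in keys):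
--         return "deepfakecnn"
--
--     return "unknown"
-- ===== SOURCE B (Python) =====
-- def detect_arch(state_dict: dict) -> str:
--     eff = conv1 = layer1 = feats = f00 = False
--     for k in state_dict:
--         if k.startswith("features."):
--             feats = True
--             if ".block." in k:
--                 eff = True
--             if k == "features.0.0.weight":
--                 f00 = True
--         elif k == "conv1.weight":
--             conv1 = True
--         elif k.startswith("layer1."):
--             layer1 = True
--     if eff or f00:
--         return "efficientnet_b0"
--     if conv1 or layer1:
--         return "resnet18"
--     if feats:
--         return "deepfakecnn"
--     return "unknown"
-- ===== Notes on version B (the rewrite author's own statement) =====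
-- stated objective: alternative
-- what changed: B makes a single pass over the keys accumulating five boolean flags (eff-block, features.0.0.weight, conv1.weight, layer1 prefix, features prefix) and decides afterwards, instead of A's four separate scans of the key list.
import Mathlib
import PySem

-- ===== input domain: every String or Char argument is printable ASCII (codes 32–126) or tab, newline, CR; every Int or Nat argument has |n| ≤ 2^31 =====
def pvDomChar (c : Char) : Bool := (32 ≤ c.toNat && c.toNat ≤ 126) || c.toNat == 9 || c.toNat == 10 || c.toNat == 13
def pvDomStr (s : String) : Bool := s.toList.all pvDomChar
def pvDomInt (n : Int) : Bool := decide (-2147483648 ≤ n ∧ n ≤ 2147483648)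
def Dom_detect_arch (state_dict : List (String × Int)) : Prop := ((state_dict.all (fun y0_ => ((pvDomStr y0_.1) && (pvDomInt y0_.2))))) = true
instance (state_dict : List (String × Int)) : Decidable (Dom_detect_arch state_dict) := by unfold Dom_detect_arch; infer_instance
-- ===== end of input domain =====

-- B replaces A's four separate scans of the key list by one fold accumulating five boolean flags (alternative decomposition, same O(n) cost).


-- ===== PORT A =====
def detect_arch (state_dict : List (String × Int)) : String :=
  let keys := state_dict.map (·.1)
  if (keys.any (fun k => PySem.Str.startswith k "features." && PySem.Str.isIn ".block." k))
      || keys.any (fun k => k == "features.0.0.weight") then "efficientnet_b0"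
  else if keys.any (fun k => k == "conv1.weight")
      || keys.any (fun k => PySem.Str.startswith k "layer1.") then "resnet18"
  else if keys.any (fun k => PySem.Str.startswith k "features.") then "deepfakecnn"
  else "unknown"

-- ===== PORT B =====
-- state: (eff, conv1, layer1, feats, f00)
def detectStep (s : Bool × Bool × Bool × Bool × Bool) (k : String) :
    Bool × Bool × Bool × Bool × Bool :=
  if PySem.Str.startswith k "features." then
    (s.1 || PySem.Str.isIn ".block." k, s.2.1, s.2.2.1, true,
     s.2.2.2.2 || (k == "features.0.0.weight"))
  else if k == "conv1.weight" then
    (s.1, true, s.2.2.1, s.2.2.2.1, s.2.2.2.2)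
  else if PySem.Str.startswith k "layer1." then
    (s.1, s.2.1, true, s.2.2.2.1, s.2.2.2.2)
  else s

def detect_arch_alt (state_dict : List (String × Int)) : String :=
  let r := state_dict.foldl (fun s p => detectStep s p.1) (false, false, false, false, false)
  if r.1 || r.2.2.2.2 then "efficientnet_b0"
  else if r.2.1 || r.2.2.1 then "resnet18"
  else if r.2.2.2.1 then "deepfakecnn"
  else "unknown"

-- ===== PRECONDITION & SPEC =====
def Spec_detect_arch (state_dict : List (String × Int)) (out : String) : Prop := out = detect_arch_alt state_dict
instance (state_dict : List (String × Int)) (out : String) : Decidable (Spec_detect_arch state_dict out) := by unfold Spec_detect_arch; infer_instance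

-- ===== CLAIM (what is proved, stated in full; the proofs are below) =====
def Claim_equal_detect_arch : Prop := ∀ (state_dict : List (String × Int)), Dom_detect_arch state_dict → Spec_detect_arch state_dict (detect_arch state_dict)

-- ===== LEMMAS AND PROOFS =====

-- a key cannot start with both "features." and "layer1."
theorem not_sw_both (k : String)
    (h1 : PySem.Str.startswith k "features." = true)
    (h2 : PySem.Str.startswith k "layer1." = true) : False := by
  simp only [PySem.Str.startswith_eq] at h1 h2
  rw [PySem.Chars.startswith_iff] at h1 h2
  rcases List.prefix_or_prefix_of_prefix h1 h2 with h | h <;> revert h <;> decide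

theorem eq_conv1_not_features (k : String) (h : (k == "conv1.weight") = true) :
    PySem.Str.startswith k "features." = false := by
  rw [beq_iff_eq] at h; subst h; decide

theorem eq_conv1_not_layer1 (k : String) (h : (k == "conv1.weight") = true) :
    PySem.Str.startswith k "layer1." = false := by
  rw [beq_iff_eq] at h; subst h; decide

theorem eq_f00_sw_features (k : String) (h : (k == "features.0.0.weight") = true) :
    PySem.Str.startswith k "features." = true := by
  rw [beq_iff_eq] at h; subst h; decide

-- each component of one step of B is the OR of the old flag with A's per-key predicate
theorem detectStep_eq (s : Bool × Bool × Bool × Bool × Bool) (k : String) :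
    detectStep s k =
      (s.1 || (PySem.Str.startswith k "features." && PySem.Str.isIn ".block." k),
       s.2.1 || (k == "conv1.weight"),
       s.2.2.1 || PySem.Str.startswith k "layer1.",
       s.2.2.2.1 || PySem.Str.startswith k "features.",
       s.2.2.2.2 || (k == "features.0.0.weight")) := by
  unfold detectStep
  split_ifs with h1 h2 h3
  · have hc : (k == "conv1.weight") = false := by
      cases hq : k == "conv1.weight"
      · rfl
      · rw [eq_conv1_not_features k hq] at h1; cases h1
    have hl : PySem.Str.startswith k "layer1." = false := by
      cases hq : PySem.Str.startswith k "layer1."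
      · rfl
      · exact absurd (not_sw_both k h1 hq) (by simp)
    simp only [h1, hc, hl, Bool.true_and, Bool.or_false, Bool.or_true]
  · have hf : PySem.Str.startswith k "features." = false := Bool.eq_false_iff.mpr h1
    have hl := eq_conv1_not_layer1 k h2
    have h00 : (k == "features.0.0.weight") = false := by
      cases hq : k == "features.0.0.weight"
      · rfl
      · rw [eq_f00_sw_features k hq] at hf; cases hf
    simp only [hf, h2, hl, h00, Bool.false_and, Bool.or_false, Bool.or_true]
  · have hf : PySem.Str.startswith k "features." = false := Bool.eq_false_iff.mpr h1
    have hc : (k == "conv1.weight") = false := Bool.eq_false_iff.mpr h2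
    have h00 : (k == "features.0.0.weight") = false := by
      cases hq : k == "features.0.0.weight"
      · rfl
      · rw [eq_f00_sw_features k hq] at hf; cases hf
    simp only [hf, hc, h3, h00, Bool.false_and, Bool.or_false, Bool.or_true]
  · have hf : PySem.Str.startswith k "features." = false := Bool.eq_false_iff.mpr h1
    have hc : (k == "conv1.weight") = false := Bool.eq_false_iff.mpr h2
    have hl : PySem.Str.startswith k "layer1." = false := Bool.eq_false_iff.mpr h3
    have h00 : (k == "features.0.0.weight") = false := by
      cases hq : k == "features.0.0.weight"
      · rfl
      · rw [eq_f00_sw_features k hq] at hf; cases hf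
    simp only [hf, hc, hl, h00, Bool.false_and, Bool.or_false]

theorem fold_spec (l : List (String × Int)) (s : Bool × Bool × Bool × Bool × Bool) :
    l.foldl (fun s p => detectStep s p.1) s =
      (s.1 || l.any (fun p => PySem.Str.startswith p.1 "features." && PySem.Str.isIn ".block." p.1),
       s.2.1 || l.any (fun p => p.1 == "conv1.weight"),
       s.2.2.1 || l.any (fun p => PySem.Str.startswith p.1 "layer1."),
       s.2.2.2.1 || l.any (fun p => PySem.Str.startswith p.1 "features."),
       s.2.2.2.2 || l.any (fun p => p.1 == "features.0.0.weight")) := by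
  induction l generalizing s with
  | nil => simp
  | cons p t ih =>
    rw [List.foldl_cons, ih, detectStep_eq]
    simp only [List.any_cons, Bool.or_assoc]

-- ===== VERDICT (by name: the statement is the Claim_ definition above) =====
theorem detect_arch_spec : Claim_equal_detect_arch := by
  intro state_dict _
  unfold Spec_detect_arch detect_arch detect_arch_alt
  rw [fold_spec]
  simp only [List.any_map, Function.comp_def, Bool.false_or]
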